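-- pv_equiv track=rewrite | github.com/skrcka/BAAD | cv_5.py | binary_search_on_suffix_array
-- ===== SOURCE A (Python) =====
-- def binary_search_on_suffix_array(string: str, suffix_array: str, pattern: str) -> int | None:
--     l = 0
--     r = len(suffix_array) - 1
--
--     while l <= r:
--         mid = (l + r) // 2
--         suffix = string[suffix_array[mid]:]
--
--         if pattern == suffix[:len(pattern)]:
--             return suffix_array[mid]
--         elif pattern < suffix:
--             r = mid - 1
--         else:
--             l = mid + 1
--
--     return None
-- ===== SOURCE B (Python) =====
-- def binary_search_on_suffix_array(string: str, suffix_array, pattern: str):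
--     def cmp_at(i):
--         suffix = string[i:]
--         if suffix.startswith(pattern):
--             return 0
--         return -1 if pattern < suffix else 1
--
--     def search(lo, hi):
--         if lo > hi:
--             return None
--         mid = (lo + hi) // 2
--         c = cmp_at(suffix_array[mid])
--         if c == 0:
--             return suffix_array[mid]
--         if c < 0:
--             return search(lo, mid - 1)
--         return search(mid + 1, hi)
--
--     return search(0, len(suffix_array) - 1)
-- ===== Notes on version B (the rewrite author's own statement) =====
-- stated objective: alternative
-- what changed: The while-loop with mutable l/r and an inline slice-equality test becomes a recursive search over the [lo, hi] interval driven by a separate three-way comparator helper that uses startswith instead of comparing pattern against a slice.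
import Mathlib
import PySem

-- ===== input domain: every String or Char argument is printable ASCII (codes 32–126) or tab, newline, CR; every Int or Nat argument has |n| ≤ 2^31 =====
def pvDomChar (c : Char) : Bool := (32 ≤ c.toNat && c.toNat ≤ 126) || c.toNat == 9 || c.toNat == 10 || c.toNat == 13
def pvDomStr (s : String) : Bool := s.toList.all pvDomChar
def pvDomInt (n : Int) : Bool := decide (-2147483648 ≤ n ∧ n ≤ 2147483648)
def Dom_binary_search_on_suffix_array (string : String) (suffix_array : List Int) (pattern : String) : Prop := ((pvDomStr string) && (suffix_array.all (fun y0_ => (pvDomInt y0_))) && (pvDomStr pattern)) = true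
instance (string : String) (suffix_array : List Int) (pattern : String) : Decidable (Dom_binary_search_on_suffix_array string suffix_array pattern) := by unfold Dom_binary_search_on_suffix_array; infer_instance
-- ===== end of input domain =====

-- B rewrites A's while-loop as a recursive interval search with a three-way comparator helper (same results; objective: alternative decomposition).
-- ===== PORT A =====
-- termination helper for both ports: (l+r)//2 stays inside [l, r]
lemma mid_bounds (l r : Int) (h : l ≤ r) :
    l ≤ PySem.Int.floordiv (l + r) 2 ∧ PySem.Int.floordiv (l + r) 2 ≤ r := by
  constructor
  · exact (PySem.Int.le_floordiv_iff_mul_le (by omega)).mpr (by omega)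
  · have := (PySem.Int.floordiv_lt_iff_lt_mul (a := l + r) (b := 2) (q := r + 1) (by omega)).mpr (by omega)
    omega

-- A's while-loop over mutable l/r, transcribed as recursion on the interval width.
def pyA_loop (s : List Char) (sa : List Int) (p : List Char) (l r : Int) : Option Int :=
  if h : l ≤ r then
    let mid := PySem.Int.floordiv (l + r) 2
    let suffix := PySem.List.slice s (some (PySem.List.pyGetD sa mid 0)) none
    if p = PySem.List.slice suffix none (some (p.length : Int)) then
      some (PySem.List.pyGetD sa mid 0)
    else if p < suffix then pyA_loop s sa p l (mid - 1)
    else pyA_loop s sa p (mid + 1) r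
  else none
termination_by (r + 1 - l).toNat
decreasing_by
  · have := mid_bounds l r h; omega
  · have := mid_bounds l r h; omega


def binary_search_on_suffix_array (string : String) (suffix_array : List Int) (pattern : String) : Option Int :=
  pyA_loop string.toList suffix_array pattern.toList 0 ((suffix_array.length : Int) - 1)

-- ===== PORT B =====
def bCmpAt (s p : List Char) (i : Int) : Int :=
  let suffix := PySem.List.slice s (some i) none
  if PySem.Chars.startswith suffix p then 0
  else if p < suffix then -1 else 1

def bSearch (s : List Char) (sa : List Int) (p : List Char) (lo hi : Int) : Option Int :=
  if h : lo > hi then none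
  else
    let mid := PySem.Int.floordiv (lo + hi) 2
    let c := bCmpAt s p (PySem.List.pyGetD sa mid 0)
    if c = 0 then some (PySem.List.pyGetD sa mid 0)
    else if c < 0 then bSearch s sa p lo (mid - 1)
    else bSearch s sa p (mid + 1) hi
termination_by (hi + 1 - lo).toNat
decreasing_by
  · have := mid_bounds lo hi (by omega); omega
  · have := mid_bounds lo hi (by omega); omega


def binary_search_on_suffix_array_alt (string : String) (suffix_array : List Int) (pattern : String) : Option Int :=
  bSearch string.toList suffix_array pattern.toList 0 ((suffix_array.length : Int) - 1)

-- ===== PRECONDITION & SPEC =====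
def Spec_binary_search_on_suffix_array (string : String) (suffix_array : List Int) (pattern : String) (out : Option Int) : Prop := out = binary_search_on_suffix_array_alt string suffix_array pattern
instance (string : String) (suffix_array : List Int) (pattern : String) (out : Option Int) : Decidable (Spec_binary_search_on_suffix_array string suffix_array pattern out) := by unfold Spec_binary_search_on_suffix_array; infer_instance

-- ===== CLAIM (what is proved, stated in full; the proofs are below) =====
def Claim_equal_binary_search_on_suffix_array : Prop := ∀ (string : String) (suffix_array : List Int) (pattern : String), Dom_binary_search_on_suffix_array string suffix_array pattern → Spec_binary_search_on_suffix_array string suffix_array pattern (binary_search_on_suffix_array string suffix_array pattern)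

-- ===== LEMMAS AND PROOFS =====
-- A's test "pattern == suffix[:len(pattern)]" is exactly "suffix.startswith(pattern)".
lemma take_eq_iff_startswith (p suffix : List Char) :
    (p = PySem.List.slice suffix none (some (p.length : Int))) ↔
      PySem.Chars.startswith suffix p = true := by
  rw [PySem.List.slice_to_natCast, PySem.Chars.startswith_iff, List.prefix_iff_eq_take]

lemma bSearch_step (s : List Char) (sa : List Int) (p : List Char) (lo hi : Int) (h : lo ≤ hi) :
    bSearch s sa p lo hi =
      (if PySem.Chars.startswith (PySem.List.slice s (some (PySem.List.pyGetD sa (PySem.Int.floordiv (lo + hi) 2) 0)) none) p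
       then some (PySem.List.pyGetD sa (PySem.Int.floordiv (lo + hi) 2) 0)
       else if p < PySem.List.slice s (some (PySem.List.pyGetD sa (PySem.Int.floordiv (lo + hi) 2) 0)) none
       then bSearch s sa p lo (PySem.Int.floordiv (lo + hi) 2 - 1)
       else bSearch s sa p (PySem.Int.floordiv (lo + hi) 2 + 1) hi) := by
  rw [bSearch, dif_neg (show ¬ lo > hi by omega)]
  simp only [bCmpAt]
  by_cases hs : PySem.Chars.startswith (PySem.List.slice s (some (PySem.List.pyGetD sa (PySem.Int.floordiv (lo + hi) 2) 0)) none) p = true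
  · simp only [hs]
    norm_num
  · simp only [hs]
    by_cases hlt : p < PySem.List.slice s (some (PySem.List.pyGetD sa (PySem.Int.floordiv (lo + hi) 2) 0)) none
    · simp only [hlt]
      norm_num
    · simp only [hlt]
      norm_num

lemma loop_eq_search (s : List Char) (sa : List Int) (p : List Char) (l r : Int) :
    pyA_loop s sa p l r = bSearch s sa p l r := by
  induction l, r using pyA_loop.induct s sa p with
  | case1 l r h mid suffix heq =>
      rw [pyA_loop, dif_pos h, if_pos heq, bSearch_step s sa p l r h,
        if_pos ((take_eq_iff_startswith p suffix).mp heq)]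
  | case2 l r h mid suffix heq hlt ih =>
      have hs : ¬ PySem.Chars.startswith suffix p = true := fun hc =>
        heq ((take_eq_iff_startswith p suffix).mpr hc)
      rw [pyA_loop, dif_pos h, if_neg heq, if_pos hlt, bSearch_step s sa p l r h,
        if_neg hs, if_pos hlt, ih]
  | case3 l r h mid suffix heq hlt ih =>
      have hs : ¬ PySem.Chars.startswith suffix p = true := fun hc =>
        heq ((take_eq_iff_startswith p suffix).mpr hc)
      rw [pyA_loop, dif_pos h, if_neg heq, if_neg hlt, bSearch_step s sa p l r h,
        if_neg hs, if_neg hlt, ih]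
  | case4 l r h =>
      rw [pyA_loop, dif_neg h, bSearch, dif_pos (show l > r by omega)]

-- ===== VERDICT (by name: the statement is the Claim_ definition above) =====
theorem binary_search_on_suffix_array_spec : Claim_equal_binary_search_on_suffix_array := by
  intro string suffix_array pattern _
  unfold Spec_binary_search_on_suffix_array binary_search_on_suffix_array binary_search_on_suffix_array_alt
  exact loop_eq_search _ _ _ _ _
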